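-- pv_equiv track=rewrite | github.com/ttzck/aoc23 | 9.py | deconstruct
-- ===== SOURCE A (Python) =====
-- def deconstruct(seq):
--     seqs = [seq]
--     if any(map(lambda x: x != 0, seq)):
--         next_seq = []
--         for i in range(1, len(seqs[-1])):
--             next_seq.append(seq[i] - seq[i-1])
--         seqs.extend(deconstruct(next_seq))
--     return seqs
-- ===== SOURCE B (Python) =====
-- def deconstruct(seq):
--     seqs = [seq]
--     while any(x != 0 for x in seqs[-1]):
--         cur = seqs[-1]
--         seqs.append([cur[i] - cur[i-1] for i in range(1, len(cur))])
--     return seqs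
-- ===== Notes on version B (the rewrite author's own statement) =====
-- stated objective: alternative
-- what changed: Replaced the self-recursion plus extend with an explicit iterative while-loop that repeatedly appends the difference list of the current last level until it is all zeros.
import Mathlib
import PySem

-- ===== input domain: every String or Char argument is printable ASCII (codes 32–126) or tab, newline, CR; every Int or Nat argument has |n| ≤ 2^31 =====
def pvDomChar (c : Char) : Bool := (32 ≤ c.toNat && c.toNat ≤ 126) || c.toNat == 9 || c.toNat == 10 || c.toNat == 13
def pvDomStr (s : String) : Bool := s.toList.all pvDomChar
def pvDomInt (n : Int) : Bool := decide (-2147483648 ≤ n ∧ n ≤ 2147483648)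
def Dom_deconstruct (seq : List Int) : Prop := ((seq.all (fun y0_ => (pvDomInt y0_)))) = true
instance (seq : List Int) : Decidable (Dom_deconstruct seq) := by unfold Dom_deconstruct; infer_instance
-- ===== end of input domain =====

-- B replaces A's self-recursion + extend with an explicit while-loop accumulating levels; same cost, different decomposition.

-- ===== PORT A =====
-- A's inner for-loop: next_seq.append(seq[i] - seq[i-1]) for i in range(1, len(seq))
def pvDiffA (seq : List Int) : List Int :=
  (PySem.List.pyRange 1 (seq.length : Int) 1).foldl
    (fun acc i => acc ++ [PySem.List.pyGetD seq i 0 - PySem.List.pyGetD seq (i - 1) 0]) []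

-- termination fact for both ports (the ports cite it in decreasing_by)
theorem pvDiff_len_lt (seq : List Int) (h : seq.any (fun x => x != 0) = true) :
    ((PySem.List.pyRange 1 (seq.length : Int) 1).length) < seq.length := by
  have hne : seq ≠ [] := by rintro rfl; simp at h
  have : 1 ≤ seq.length := List.length_pos_iff.mpr hne
  rw [PySem.List.length_pyRange_one]
  omega

theorem pvDiffA_len_lt (seq : List Int) (h : seq.any (fun x => x != 0) = true) :
    (pvDiffA seq).length < seq.length := by
  have := pvDiff_len_lt seq h
  rw [pvDiffA, PySem.List.foldl_append_singleton_eq_map]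
  simpa using this

def deconstruct (seq : List Int) : List (List Int) :=
  if h : seq.any (fun x => x != 0) = true then
    [seq] ++ deconstruct (pvDiffA seq)
  else
    [seq]
termination_by seq.length
decreasing_by exact pvDiffA_len_lt seq h

-- ===== PORT B =====
-- B's difference level: [cur[i] - cur[i-1] for i in range(1, len(cur))]
def pvDiffB (cur : List Int) : List Int :=
  (PySem.List.pyRange 1 (cur.length : Int) 1).map
    (fun i => PySem.List.pyGetD cur i 0 - PySem.List.pyGetD cur (i - 1) 0)

theorem pvDiffB_len_lt (cur : List Int) (h : cur.any (fun x => x != 0) = true) :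
    (pvDiffB cur).length < cur.length := by
  have := pvDiff_len_lt cur h
  simpa [pvDiffB] using this

-- the while-loop: seqs grows until its last level is all zeros (cur is that last level)
def pvLoopB (cur : List Int) (seqs : List (List Int)) : List (List Int) :=
  if h : cur.any (fun x => x != 0) = true then
    pvLoopB (pvDiffB cur) (seqs ++ [pvDiffB cur])
  else
    seqs
termination_by cur.length
decreasing_by exact pvDiffB_len_lt cur h

def deconstruct_alt (seq : List Int) : List (List Int) :=
  pvLoopB seq [seq]

-- ===== PRECONDITION & SPEC =====
def Spec_deconstruct (seq : List Int) (out : List (List Int)) : Prop := out = deconstruct_alt seq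
instance (seq : List Int) (out : List (List Int)) : Decidable (Spec_deconstruct seq out) := by unfold Spec_deconstruct; infer_instance

-- ===== CLAIM (what is proved, stated in full; the proofs are below) =====
def Claim_equal_deconstruct : Prop := ∀ (seq : List Int), Dom_deconstruct seq → Spec_deconstruct seq (deconstruct seq)

-- ===== LEMMAS AND PROOFS =====
theorem pvDiffA_eq_pvDiffB (seq : List Int) : pvDiffA seq = pvDiffB seq := by
  rw [pvDiffA, pvDiffB, PySem.List.foldl_append_singleton_eq_map]
  simp

theorem deconstruct_head (c : List Int) : deconstruct c = c :: (deconstruct c).drop 1 := by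
  rw [deconstruct]
  split <;> simp

theorem pvLoopB_eq (n : Nat) (cur : List Int) (hn : cur.length ≤ n) (seqs : List (List Int)) :
    pvLoopB cur seqs = seqs ++ (deconstruct cur).drop 1 := by
  induction n generalizing cur seqs with
  | zero =>
    have : cur = [] := List.length_eq_zero_iff.mp (Nat.le_zero.mp hn)
    subst this
    rw [pvLoopB, deconstruct]
    simp
  | succ n ih =>
    rw [pvLoopB, deconstruct]
    by_cases h : cur.any (fun x => x != 0) = true
    · simp only [h, dif_pos]
      have hlt := pvDiffB_len_lt cur h
      rw [ih (pvDiffB cur) (by omega), ← pvDiffA_eq_pvDiffB]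
      conv_rhs => rw [deconstruct_head (pvDiffA cur)]
      simp [pvDiffA_eq_pvDiffB]
    · simp [h]

-- ===== VERDICT (by name: the statement is the Claim_ definition above) =====
theorem deconstruct_spec : Claim_equal_deconstruct := by
  intro seq _
  unfold Spec_deconstruct deconstruct_alt
  rw [pvLoopB_eq seq.length seq le_rfl]
  rw [deconstruct]
  by_cases h : seq.any (fun x => x != 0) = true <;> simp [h]
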